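-- pv_equiv track=rewrite | github.com/Natanal-H/algorithm | programmers/모든 문제/level 1/PCCP/PCCP_10_공원.py | solution
-- ===== SOURCE A (Python) =====
-- def solution(mats, park):
--     m = 0
--     arr = [[0 for _ in range(len(park[0])+1)] for _ in range(len(park)+1)]
--
--     for i in range(len(park)):
--         for j in range(len(park[0])):
--             if park[i][j] != '-1' : continue
--             arr[i+1][j+1] = min(arr[i][j], arr[i][j+1], arr[i+1][j]) + 1
--             m = max(m, arr[i+1][j+1])
--
--     mats.sort(reverse=True)
--     for mat in mats:
--         if mat <= m : return mat
--
--     return -1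
-- ===== SOURCE B (Python) =====
-- def solution(mats, park):
--     h, w = len(park), len(park[0])
--
--     def has_empty_square(s):
--         return any(
--             all(park[i + a][j + b] == '-1' for a in range(s) for b in range(s))
--             for i in range(h - s + 1)
--             for j in range(w - s + 1)
--         )
--
--     m = 0
--     for s in range(min(h, w), 0, -1):
--         if has_empty_square(s):
--             m = s
--             break
--
--     return max((x for x in mats if x <= m), default=-1)
-- ===== Notes on version B (the rewrite author's own statement) =====
-- stated objective: alternative
-- what changed: Replaces the incremental maximal-square DP table with a search over candidate side lengths (largest first) that tests each s x s window directly, and replaces sort-descending-then-scan over mats with a single max over the mats that fit.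
import Mathlib
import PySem

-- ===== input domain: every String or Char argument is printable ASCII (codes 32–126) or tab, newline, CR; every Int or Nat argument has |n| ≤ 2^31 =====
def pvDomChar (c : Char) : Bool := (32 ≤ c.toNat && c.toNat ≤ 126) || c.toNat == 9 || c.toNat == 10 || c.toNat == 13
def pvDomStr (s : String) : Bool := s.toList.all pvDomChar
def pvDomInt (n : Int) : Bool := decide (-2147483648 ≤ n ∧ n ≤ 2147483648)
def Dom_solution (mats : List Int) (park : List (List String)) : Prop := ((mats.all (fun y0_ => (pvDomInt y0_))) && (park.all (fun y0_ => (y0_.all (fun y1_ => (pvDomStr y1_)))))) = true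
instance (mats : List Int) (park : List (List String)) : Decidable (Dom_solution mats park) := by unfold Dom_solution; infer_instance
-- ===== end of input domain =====

-- B replaces A's maximal-square DP table by a largest-first search over side lengths that
-- checks each window directly, and replaces sort-descending+scan over mats by a filtered max.
-- Note: Python A sorts `mats` in place (a caller-visible mutation); B does not. The
-- equivalence proved here is about the RETURN value.

-- shared helper: park[i][j] read (in range under Pre_), compared with '-1'
def cellEmpty (park : List (List String)) (i j : Nat) : Bool :=
  ((park.getD i []).getD j "") == "-1"

-- ===== PORT A =====
def stepA (park : List (List String)) (i : Nat)
    (st : (Nat → Nat → Int) × Int) (j : Nat) : (Nat → Nat → Int) × Int :=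
  if cellEmpty park i j then
    let v := min (min (st.1 i j) (st.1 i (j+1))) (st.1 (i+1) j) + 1
    (fun a b => if a == i+1 && b == j+1 then v else st.1 a b, max st.2 v)
  else st

def rowA (park : List (List String)) (w : Nat)
    (st : (Nat → Nat → Int) × Int) (i : Nat) : (Nat → Nat → Int) × Int :=
  (List.range w).foldl (stepA park i) st

def solution (mats : List Int) (park : List (List String)) : Int :=
  let h := park.length
  let w := (park.headD []).length
  let st := (List.range h).foldl (rowA park w) (fun _ _ => (0:Int), (0:Int))
  let m := st.2
  match (PySem.List.sorted mats (fun x => x) true).find? (fun mat => decide (mat ≤ m)) with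
  | some mat => mat
  | none => -1

-- ===== PORT B =====
def hasEmptySquare (park : List (List String)) (h w s : Nat) : Bool :=
  (List.range (h - s + 1)).any fun i =>
    (List.range (w - s + 1)).any fun j =>
      (List.range s).all fun a =>
        (List.range s).all fun b => cellEmpty park (i+a) (j+b)

def solution_alt (mats : List Int) (park : List (List String)) : Int :=
  let h := park.length
  let w := (park.headD []).length
  let mw := min h w
  let m : Int :=
    match ((List.range mw).map (fun k => mw - k)).find? (hasEmptySquare park h w) with
    | some s => (s : Int)
    | none => 0
  (PySem.List.max? (mats.filter (fun x => decide (x ≤ m))) (fun y => y)).getD (-1)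

-- ===== PRECONDITION & SPEC =====
-- Pre_ excludes exactly the inputs on which Python A raises IndexError:
-- an empty park (park[0]) and parks whose later rows are shorter than row 0 (park[i][j]).
def Pre_solution (mats : List Int) (park : List (List String)) : Prop :=
  park ≠ [] ∧ ∀ row ∈ park, (park.headD []).length ≤ row.length
instance (mats : List Int) (park : List (List String)) : Decidable (Pre_solution mats park) := by
  unfold Pre_solution; infer_instance

def pvWitness_solution : List Int × List (List String) :=
  ([5, 3, 2], [["-1", "-1", "0"], ["-1", "-1", "-1"], ["1", "-1", "-1"]])

def Spec_solution (mats : List Int) (park : List (List String)) (out : Int) : Prop := out = solution_alt mats park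
instance (mats : List Int) (park : List (List String)) (out : Int) : Decidable (Spec_solution mats park out) := by unfold Spec_solution; infer_instance

-- ===== CLAIM (what is proved, stated in full; the proofs are below) =====
def Claim_equal_solution : Prop := ∀ (mats : List Int) (park : List (List String)), Dom_solution mats park → Pre_solution mats park → Spec_solution mats park (solution mats park)

-- ===== LEMMAS AND PROOFS =====

-- the largest empty square with bottom-right corner (i, j) (the value A's DP cell holds)
def sqAt (park : List (List String)) (i j : Nat) : Nat :=
  if cellEmpty park i j then
    match i, j with
    | 0, _ => 1
    | _+1, 0 => 1
    | i'+1, j'+1 =>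
        min (min (sqAt park i' j') (sqAt park i' (j'+1))) (sqAt park (i'+1) j') + 1
  else 0
termination_by i + j
decreasing_by all_goals omega

-- characterization of sq: s ≤ sq i j iff an s×s all-empty square has bottom-right corner (i,j)
theorem sqAt_iff (park : List (List String)) (i j s : Nat) :
    s ≤ sqAt park i j ↔
      (s = 0 ∨ (s ≤ i + 1 ∧ s ≤ j + 1 ∧ ∀ a < s, ∀ b < s, cellEmpty park (i - a) (j - b))) := by
  induction hn : i + j using Nat.strong_induction_on generalizing i j s with
  | _ n ih =>
  subst hn
  by_cases hc : cellEmpty park i j = true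
  · match i, j with
    | 0, j =>
      rw [sqAt, if_pos hc]
      constructor
      · intro hs
        match s, hs with
        | 0, _ => exact Or.inl rfl
        | 1, _ =>
          refine Or.inr ⟨le_rfl, by omega, ?_⟩
          intro a ha b hb
          have ha0 : a = 0 := by omega
          have hb0 : b = 0 := by omega
          subst ha0; subst hb0
          simpa using hc
      · rintro (rfl | ⟨h1, _, _⟩) <;> omega
    | i+1, 0 =>
      rw [sqAt, if_pos hc]
      constructor
      · intro hs
        match s, hs with
        | 0, _ => exact Or.inl rfl
        | 1, _ =>
          refine Or.inr ⟨by omega, le_rfl, ?_⟩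
          intro a ha b hb
          have ha0 : a = 0 := by omega
          have hb0 : b = 0 := by omega
          subst ha0; subst hb0
          simpa using hc
      · rintro (rfl | ⟨_, h2, _⟩) <;> omega
    | i+1, j+1 =>
      rw [sqAt, if_pos hc]
      have ih1 := fun s => ih (i + j) (by omega) i j s rfl
      have ih2 := fun s => ih (i + (j+1)) (by omega) i (j+1) s rfl
      have ih3 := fun s => ih ((i+1) + j) (by omega) (i+1) j s rfl
      constructor
      · intro hs
        match s, hs with
        | 0, _ => exact Or.inl rfl
        | t+1, hs =>
          have hmin : t ≤ sqAt park i j ∧ t ≤ sqAt park i (j+1) ∧ t ≤ sqAt park (i+1) j := by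
            omega
          refine Or.inr ?_
          by_cases ht : t = 0
          · subst ht
            refine ⟨by omega, by omega, ?_⟩
            intro a ha b hb
            have ha0 : a = 0 := by omega
            have hb0 : b = 0 := by omega
            subst ha0; subst hb0
            simpa using hc
          · rcases (ih1 t).1 hmin.1 with h1 | ⟨h1a, h1b, h1sq⟩
            · omega
            rcases (ih2 t).1 hmin.2.1 with h2 | ⟨h2a, h2b, h2sq⟩
            · omega
            rcases (ih3 t).1 hmin.2.2 with h3 | ⟨h3a, h3b, h3sq⟩
            · omega
            refine ⟨by omega, by omega, ?_⟩
            intro a ha b hb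
            match a, b with
            | 0, 0 => simpa using hc
            | 0, b+1 =>
              have := h3sq 0 (by omega) b (by omega)
              convert this using 2 <;> omega
            | a+1, 0 =>
              have := h2sq a (by omega) 0 (by omega)
              convert this using 2 <;> omega
            | a+1, b+1 =>
              have := h1sq a (by omega) b (by omega)
              convert this using 2 <;> omega
      · rintro (rfl | ⟨hb1, hb2, hsq⟩)
        · omega
        match s, hb1 with
        | 0, _ => omega
        | t+1, _ =>
          have h1 : t ≤ sqAt park i j := by
            refine (ih1 t).2 (Or.inr ⟨by omega, by omega, ?_⟩)
            intro a ha b hb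
            have := hsq (a+1) (by omega) (b+1) (by omega)
            convert this using 2 <;> omega
          have h2 : t ≤ sqAt park i (j+1) := by
            refine (ih2 t).2 (Or.inr ⟨by omega, by omega, ?_⟩)
            intro a ha b hb
            have := hsq (a+1) (by omega) b (by omega)
            convert this using 2 <;> omega
          have h3 : t ≤ sqAt park (i+1) j := by
            refine (ih3 t).2 (Or.inr ⟨by omega, by omega, ?_⟩)
            intro a ha b hb
            have := hsq a (by omega) (b+1) (by omega)
            convert this using 2 <;> omega
          omega
  · rw [sqAt.eq_def, if_neg hc]
    constructor
    · intro hs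
      exact Or.inl (by omega)
    · rintro (rfl | ⟨hb1, hb2, hsq⟩)
      · omega
      · match s, hb1 with
        | 0, _ => omega
        | t+1, _ =>
          exact absurd (by simpa using hsq 0 (by omega) 0 (by omega)) hc

theorem sqAt_le (park : List (List String)) (i j : Nat) : sqAt park i j ≤ min (i+1) (j+1) := by
  have h := (sqAt_iff park i j (sqAt park i j)).1 le_rfl
  rcases h with h | ⟨h1, h2, _⟩ <;> omega

-- B's window test, characterized through sq
theorem hasEmptySquare_iff (park : List (List String)) (h w s : Nat)
    (hs : 1 ≤ s) (hsh : s ≤ h) (hsw : s ≤ w) :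
    hasEmptySquare park h w s = true ↔ ∃ p < h, ∃ q < w, s ≤ sqAt park p q := by
  unfold hasEmptySquare
  simp only [List.any_eq_true, List.all_eq_true, List.mem_range]
  constructor
  · rintro ⟨i, hi, j, hj, hsq⟩
    refine ⟨i + s - 1, by omega, j + s - 1, by omega, ?_⟩
    refine (sqAt_iff park _ _ s).2 (Or.inr ⟨by omega, by omega, ?_⟩)
    intro a ha b hb
    have := hsq (s - 1 - a) (by omega) (s - 1 - b) (by omega)
    convert this using 2 <;> omega
  · rintro ⟨p, hp, q, hq, hs'⟩
    rcases (sqAt_iff park p q s).1 hs' with rfl | ⟨ha1, ha2, hsq⟩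
    · omega
    refine ⟨p + 1 - s, by omega, q + 1 - s, by omega, ?_⟩
    intro a ha b hb
    have := hsq (s - 1 - a) (by omega) (s - 1 - b) (by omega)
    convert this using 2 <;> omega

-- find? over the descending list [c, c-1, …, 1]
theorem findDesc (pred : Nat → Bool) (M c : Nat) (hM : M ≤ c)
    (h : ∀ t, 1 ≤ t → t ≤ c → (pred t = true ↔ t ≤ M)) :
    ((List.range c).map (fun k => c - k)).find? pred =
      if M = 0 then none else some M := by
  induction c generalizing M with
  | zero =>
    have : M = 0 := by omega
    subst this; simp
  | succ c ih =>
    rw [List.range_succ_eq_map, List.map_cons, List.map_map]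
    have hmap : (List.range c).map ((fun k => c + 1 - k) ∘ Nat.succ)
        = (List.range c).map (fun k => c - k) :=
      List.map_congr_left (fun k _ => by simp only [Function.comp_apply]; omega)
    rw [hmap]
    by_cases hp : pred (c+1) = true
    · have h1 := (h (c+1) (by omega) le_rfl).1 hp
      have hM1 : M = c+1 := le_antisymm hM h1
      subst hM1
      simp [List.find?_cons_of_pos, hp]
    · have h2 : M ≤ c := by
        by_contra hc
        exact hp ((h (c+1) (by omega) le_rfl).2 (by omega))
      rw [List.find?_cons_of_neg (by simpa using hp)]
      exact ih _ h2 (fun t ht1 ht2 => h t ht1 (by omega))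

-- ideal DP array after processing rows < i fully and cells (i, b) for b < j
def IdArr (park : List (List String)) (i j : Nat) : Nat → Nat → Int := fun a b =>
  if 1 ≤ a ∧ 1 ≤ b ∧ b ≤ (park.headD []).length ∧ (a - 1 < i ∨ (a - 1 = i ∧ b - 1 < j)) then
    (sqAt park (a-1) (b-1) : Int)
  else 0

-- invariant of A's fold state
def InvA (park : List (List String)) (i j : Nat) (st : (Nat → Nat → Int) × Int) : Prop :=
  st.1 = IdArr park i j ∧ 0 ≤ st.2 ∧
  (∀ p q, (p < i ∨ (p = i ∧ q < j)) → q < (park.headD []).length → (sqAt park p q : Int) ≤ st.2) ∧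
  (st.2 = 0 ∨ ∃ p q, (p < i ∨ (p = i ∧ q < j)) ∧ q < (park.headD []).length ∧ st.2 = (sqAt park p q : Int))


-- evaluating the three reads of A's step against the ideal array
theorem read_min (park : List (List String)) (i j : Nat)
    (hj : j < (park.headD []).length) (hc : cellEmpty park i j = true) :
    min (min (IdArr park i j i j) (IdArr park i j i (j+1))) (IdArr park i j (i+1) j) + 1
      = ((sqAt park i j : Nat) : Int) := by
  match i, j with
  | 0, j =>
    rw [sqAt, if_pos hc]
    unfold IdArr
    split_ifs <;> push_cast <;> omega
  | i+1, 0 =>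
    rw [sqAt, if_pos hc]
    unfold IdArr
    split_ifs <;> push_cast <;> omega
  | i+1, j+1 =>
    rw [sqAt, if_pos hc]
    unfold IdArr
    split_ifs <;> push_cast <;> omega

theorem IdArr_update (park : List (List String)) (i j : Nat)
    (hj : j < (park.headD []).length) :
    (fun a b => if a == i+1 && b == j+1 then ((sqAt park i j : Nat) : Int)
        else IdArr park i j a b) = IdArr park i (j+1) := by
  funext a b
  by_cases hab : a = i+1 ∧ b = j+1
  · obtain ⟨rfl, rfl⟩ := hab
    simp only [beq_self_eq_true, Bool.and_self, if_true]
    unfold IdArr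
    rw [if_pos (by omega)]
    simp
  · have : (a == i+1 && b == j+1) = false := by
      rcases not_and_or.1 hab with h | h <;> simp [h]
    rw [this, if_neg (by simp)]
    unfold IdArr
    split_ifs with h1 h2 h2 <;> first | rfl | (exfalso; omega)

theorem IdArr_skip (park : List (List String)) (i j : Nat)
    (hc : ¬ cellEmpty park i j = true) :
    IdArr park i j = IdArr park i (j+1) := by
  have hz : sqAt park i j = 0 := by rw [sqAt.eq_def, if_neg hc]
  funext a b
  unfold IdArr
  split_ifs with h1 h2 h2 <;> first | rfl | skip
  · exfalso; omega
  · have : a - 1 = i ∧ b - 1 = j := by omega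
    rw [this.1, this.2, hz]
    simp

theorem stepA_inv (park : List (List String)) (i j : Nat) (st : (Nat → Nat → Int) × Int)
    (hj : j < (park.headD []).length) (hst : InvA park i j st) :
    InvA park i (j+1) (stepA park i st j) := by
  obtain ⟨arr, mm⟩ := st
  obtain ⟨hArr, hnn, hub, hex⟩ := hst
  simp only at hArr hnn hub hex
  subst hArr
  unfold stepA
  by_cases hc : cellEmpty park i j = true
  · rw [if_pos hc]
    have hv : min (min (IdArr park i j i j) (IdArr park i j i (j+1))) (IdArr park i j (i+1) j) + 1
        = ((sqAt park i j : Nat) : Int) := read_min park i j hj hc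
    refine ⟨?_, ?_, ?_, ?_⟩
    · simp only [hv]
      exact IdArr_update park i j hj
    · simp only []
      omega
    · intro p q hpq hq
      simp only [hv]
      by_cases hcell : p = i ∧ q = j
      · obtain ⟨rfl, rfl⟩ := hcell
        omega
      · have : (p < i ∨ (p = i ∧ q < j)) := by
          rcases not_and_or.1 hcell with h | h <;> omega
        have := hub p q this hq
        omega
    · simp only [hv]
      right
      by_cases hle : mm ≤ ((sqAt park i j : Nat) : Int)
      · exact ⟨i, j, by omega, hj, by omega⟩
      · rcases hex with rfl | ⟨p, q, hpq, hq, hval⟩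
        · omega
        · exact ⟨p, q, by omega, hq, by omega⟩
  · rw [if_neg hc]
    have hz : sqAt park i j = 0 := by rw [sqAt.eq_def, if_neg hc]
    refine ⟨IdArr_skip park i j hc, hnn, ?_, ?_⟩
    · intro p q hpq hq
      by_cases hcell : p = i ∧ q = j
      · obtain ⟨rfl, rfl⟩ := hcell
        rw [hz]; exact hnn
      · have : (p < i ∨ (p = i ∧ q < j)) := by
          rcases not_and_or.1 hcell with h | h <;> omega
        exact hub p q this hq
    · rcases hex with h0 | ⟨p, q, hpq, hq, hval⟩
      · exact Or.inl h0
      · exact Or.inr ⟨p, q, by omega, hq, hval⟩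

theorem rowA_inv (park : List (List String)) (i : Nat) (st : (Nat → Nat → Int) × Int)
    (hst : InvA park i 0 st) :
    InvA park (i+1) 0 (rowA park ((park.headD []).length) st i) := by
  have key : ∀ n, n ≤ (park.headD []).length →
      InvA park i n ((List.range n).foldl (stepA park i) st) := by
    intro n
    induction n with
    | zero => intro _; simpa using hst
    | succ n ihn =>
      intro hn
      rw [List.range_succ, List.foldl_append, List.foldl_cons, List.foldl_nil]
      exact stepA_inv park i n _ (by omega) (ihn (by omega))
  obtain ⟨hArr, hnn, hub, hex⟩ := key ((park.headD []).length) le_rfl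
  unfold rowA
  refine ⟨?_, hnn, ?_, ?_⟩
  · rw [hArr]
    funext a b
    unfold IdArr
    split_ifs <;> first | rfl | (exfalso; omega)
  · intro p q hpq hq
    exact hub p q (by omega) hq
  · rcases hex with h0 | ⟨p, q, hpq, hq, hval⟩
    · exact Or.inl h0
    · exact Or.inr ⟨p, q, by omega, hq, hval⟩

theorem foldA_inv (park : List (List String)) :
    InvA park park.length 0
      ((List.range park.length).foldl (rowA park ((park.headD []).length))
        (fun _ _ => (0:Int), (0:Int))) := by
  have init : InvA park 0 0 (fun _ _ => (0:Int), (0:Int)) := by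
    refine ⟨?_, le_rfl, ?_, Or.inl rfl⟩
    · funext a b
      unfold IdArr
      split_ifs <;> first | rfl | (exfalso; omega)
    · intro p q hpq hq
      exfalso; omega
  have key : ∀ n, InvA park n 0
      ((List.range n).foldl (rowA park ((park.headD []).length)) (fun _ _ => (0:Int), (0:Int))) := by
    intro n
    induction n with
    | zero => simpa using init
    | succ n ihn =>
      rw [List.range_succ, List.foldl_append, List.foldl_cons, List.foldl_nil]
      exact rowA_inv park n _ ihn
  exact key park.length

-- the two programs compute the same bound m
theorem m_eq (park : List (List String)) :
    ((List.range park.length).foldl (rowA park ((park.headD []).length))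
        (fun _ _ => (0:Int), (0:Int))).2 =
      (match ((List.range (min park.length ((park.headD []).length))).map
              (fun k => min park.length ((park.headD []).length) - k)).find?
              (hasEmptySquare park park.length ((park.headD []).length)) with
        | some s => (s : Int)
        | none => 0) := by
  obtain ⟨hArr, hnn, hub, hex⟩ := foldA_inv park
  set S := (List.range park.length).foldl (rowA park ((park.headD []).length))
      (fun _ _ => (0:Int), (0:Int)) with hS
  set h := park.length
  set w := (park.headD []).length
  set MN := S.2.toNat with hMN
  have hcast : S.2 = (MN : Int) := by omega
  have hub' : ∀ p < h, ∀ q < w, sqAt park p q ≤ MN := by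
    intro p hp q hq
    have := hub p q (by omega) hq
    omega
  have hMle : MN ≤ min h w := by
    rcases hex with h0 | ⟨p, q, hpq, hq, hval⟩
    · omega
    · have := sqAt_le park p q
      have hp : p < h := by omega
      omega
  have hpred : ∀ t, 1 ≤ t → t ≤ min h w → (hasEmptySquare park h w t = true ↔ t ≤ MN) := by
    intro t ht1 ht2
    rw [hasEmptySquare_iff park h w t ht1 (by omega) (by omega)]
    constructor
    · rintro ⟨p, hp, q, hq, hts⟩
      have := hub' p hp q hq
      omega
    · intro htM
      rcases hex with h0 | ⟨p, q, hpq, hq, hval⟩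
      · omega
      · exact ⟨p, by omega, q, hq, by omega⟩
  rw [findDesc (hasEmptySquare park h w) MN (min h w) hMle hpred]
  by_cases hM0 : MN = 0
  · rw [if_pos hM0]; show S.2 = 0; omega
  · rw [if_neg hM0]; show S.2 = (MN : Int); omega

theorem max?_id_eq_none (xs : List Int) (h : xs = []) :
    PySem.List.max? xs (fun y => y) = none := by
  subst h; simp [PySem.List.max?]

theorem max?_id_eq_some (xs : List Int) (m : Int) (h1 : m ∈ xs) (h2 : ∀ y ∈ xs, y ≤ m) :
    PySem.List.max? xs (fun y => y) = some m := by
  cases hx : PySem.List.max? xs (fun y => y) with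
  | none =>
    rw [PySem.List.max?_eq_none_iff] at hx
    simp [hx] at h1
  | some m' =>
    have hm' : m' ∈ xs := PySem.List.max?_mem hx
    have hmax : m ≤ m' := by simpa using PySem.List.max?_isMax hx m h1
    exact congrArg some (le_antisymm (h2 m' hm') hmax)

-- the mat-selection step: first (mat ≤ m) in the descending sort = max of the fitting mats
theorem select_eq (mats : List Int) (m : Int) :
    (match (PySem.List.sorted mats (fun x => x) true).find? (fun mat => decide (mat ≤ m)) with
      | some mat => mat
      | none => -1) =
      (PySem.List.max? (mats.filter (fun x => decide (x ≤ m))) (fun y => y)).getD (-1) := by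
  have hperm : (PySem.List.sorted mats (fun x => x) true).Perm mats :=
    PySem.List.sorted_perm mats (fun x => x) true
  have hpair : (PySem.List.sorted mats (fun x => x) true).Pairwise (fun a b => b ≤ a) := by
    simpa using PySem.List.sorted_pairwise_rev mats (fun x => x)
  cases hf : (PySem.List.sorted mats (fun x => x) true).find? (fun mat => decide (mat ≤ m)) with
  | none =>
    have hnil : mats.filter (fun x => decide (x ≤ m)) = [] := by
      rw [List.filter_eq_nil_iff]
      intro x hx
      have hxL : x ∈ PySem.List.sorted mats (fun x => x) true := hperm.mem_iff.2 hx
      simpa using List.find?_eq_none.1 hf x hxL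
    simp [hnil, max?_id_eq_none]
  | some x =>
    obtain ⟨hx, as, bs, hLeq, has⟩ := List.find?_eq_some_iff_append.1 hf
    have hxm : x ≤ m := by simpa using hx
    have hxL : x ∈ PySem.List.sorted mats (fun x => x) true := by
      rw [hLeq]; exact List.mem_append_right _ (List.mem_cons_self)
    have hmem : x ∈ mats.filter (fun z => decide (z ≤ m)) :=
      List.mem_filter.2 ⟨hperm.mem_iff.1 hxL, by simpa using hxm⟩
    have hub : ∀ y ∈ mats.filter (fun z => decide (z ≤ m)), y ≤ x := by
      intro y hy
      obtain ⟨hy1, hy2⟩ := List.mem_filter.1 hy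
      have hym : y ≤ m := by simpa using hy2
      have hyL : y ∈ PySem.List.sorted mats (fun x => x) true := hperm.mem_iff.2 hy1
      rw [hLeq] at hyL hpair
      rcases List.mem_append.1 hyL with hyas | hyx
      · exact absurd (by simpa using hym) (by simpa using has y hyas)
      · rcases List.mem_cons.1 hyx with rfl | hybs
        · exact le_refl y
        · exact (List.pairwise_cons.1 (List.pairwise_append.1 hpair).2.1).1 y hybs
    rw [max?_id_eq_some _ x hmem hub]
    rfl

-- ===== VERDICT (by name: the statement is the Claim_ definition above) =====
theorem solution_spec : Claim_equal_solution := by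
  intro mats park _ _
  unfold Spec_solution solution solution_alt
  dsimp only
  rw [m_eq park]
  exact select_eq mats _
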